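-- pv_equiv track=rewrite | github.com/ttaerrim/algorithm | baekjoon/1284.py | calcNumber
-- ===== SOURCE A (Python) =====
-- def calcNumber(num):
--     sum = 0
--     for i in range(len(num)):
--         if num[i] == '1':
--             sum += 2
--         elif num[i] == '0':
--             sum += 4
--         else:
--             sum += 3
--     sum += len(num)+1
--     return sum
-- ===== SOURCE B (Python) =====
-- def calcNumber(num):
--     # closed form: each char is worth 3, '0' one more, '1' one less; plus len+1 spacing
--     return 4 * len(num) + 1 + num.count('0') - num.count('1')
-- ===== Notes on version B (the rewrite author's own statement) =====
-- stated objective: simpler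
-- what changed: Replaced the per-character branching accumulation loop by a closed-form arithmetic expression over two character tallies obtained with str.count.
import Mathlib
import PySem

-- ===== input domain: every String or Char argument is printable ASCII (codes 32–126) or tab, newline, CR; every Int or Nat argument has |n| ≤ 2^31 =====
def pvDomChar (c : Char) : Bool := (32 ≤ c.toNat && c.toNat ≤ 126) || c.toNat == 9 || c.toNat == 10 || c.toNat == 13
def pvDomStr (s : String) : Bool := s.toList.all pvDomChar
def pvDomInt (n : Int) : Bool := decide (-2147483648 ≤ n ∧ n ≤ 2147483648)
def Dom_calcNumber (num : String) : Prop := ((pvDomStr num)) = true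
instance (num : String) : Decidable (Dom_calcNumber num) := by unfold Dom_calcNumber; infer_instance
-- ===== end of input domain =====

-- B replaces A's per-character branching loop by a closed-form expression over two character tallies (simpler; measured faster by a constant factor: C-level str.count vs an interpreted loop).


-- ===== PORT A =====
-- loop over indices; num[i] is always in range, so pyGetD with a dummy default is exact
def calcNumber (num : String) : Int :=
  (PySem.List.pyRange 0 (PySem.Str.len num) 1).foldl
    (fun sum i =>
      if PySem.List.pyGetD num.toList i ' ' == '1' then sum + 2
      else if PySem.List.pyGetD num.toList i ' ' == '0' then sum + 4
      else sum + 3) 0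
  + (PySem.Str.len num + 1)

-- ===== PORT B =====
def calcNumber_alt (num : String) : Int :=
  4 * PySem.Str.len num + 1 + (PySem.Str.count num "0" : Int) - (PySem.Str.count num "1" : Int)

-- ===== PRECONDITION & SPEC =====
def Spec_calcNumber (num : String) (out : Int) : Prop := out = calcNumber_alt num
instance (num : String) (out : Int) : Decidable (Spec_calcNumber num out) := by unfold Spec_calcNumber; infer_instance

-- ===== CLAIM (what is proved, stated in full; the proofs are below) =====
def Claim_equal_calcNumber : Prop := ∀ (num : String), Dom_calcNumber num → Spec_calcNumber num (calcNumber num)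

-- ===== LEMMAS AND PROOFS =====

-- fuel-generic characterisation of PySem's substring-count loop for a one-character pattern
theorem pvGoSingle (c : Char) : ∀ (fuel : Nat) (l : List Char) (acc : Nat), l.length ≤ fuel →
    PySem.Chars.count.go [c] fuel l acc = acc + l.count c := by
  intro fuel
  induction fuel with
  | zero =>
    intro l acc h
    have : l = [] := List.eq_nil_of_length_eq_zero (Nat.le_zero.mp h)
    subst this
    simp [PySem.Chars.count.go]
  | succ n ih =>
    intro l acc h
    cases l with
    | nil => simp [PySem.Chars.count.go]
    | cons a t =>
      have hn : t.length ≤ n := by simpa using h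
      simp only [PySem.Chars.count.go, List.isPrefixOf, List.count_cons]
      by_cases hc : c = a
      · subst hc
        simp [ih t (acc + 1) hn]
        omega
      · have hb : (c == a) = false := by simp [hc]
        simp [hb, beq_iff_eq, Ne.symm hc, ih t acc hn]

theorem pvCountSingle (s : List Char) (c : Char) : PySem.Chars.count s [c] = s.count c := by
  simp [PySem.Chars.count, pvGoSingle]

-- A's loop body over the character list, as a closed form
theorem pvFoldChars (l : List Char) : ∀ (acc : Int),
    l.foldl (fun sum c => if c == '1' then sum + 2 else if c == '0' then sum + 4 else sum + 3) acc
      = acc + 3 * l.length + (l.count '0' : Int) - (l.count '1' : Int) := by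
  induction l with
  | nil => intro acc; simp
  | cons a t ih =>
    intro acc
    simp only [List.foldl_cons, List.count_cons, ih]
    by_cases h1 : a = '1'
    · simp [h1]; ring
    · by_cases h0 : a = '0'
      · simp [h0]; ring
      · have b1 : (a == '1') = false := by simp [h1]
        have b0 : (a == '0') = false := by simp [h0]
        simp [b1, b0]
        ring

-- ===== VERDICT (by name: the statement is the Claim_ definition above) =====
theorem calcNumber_spec : Claim_equal_calcNumber := by
  intro num _
  unfold Spec_calcNumber calcNumber calcNumber_alt
  rw [show PySem.Str.len num = (num.toList.length : Int) from by simp [PySem.Str.len],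
      PySem.List.foldl_pyRange_zero_pyGetD' num.toList ' '
        (fun sum c => if c == '1' then sum + 2 else if c == '0' then sum + 4 else sum + 3) 0,
      pvFoldChars]
  simp [PySem.Str.count, pvCountSingle]
  ring
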